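-- pv_equiv track=rewrite | github.com/jonessis331/puzzle_game | puzzle/dominoes_game.py | heuristicSolver
-- ===== SOURCE A (Python) =====
-- def heuristicSolver(state):
--     reversedDisks = []
--     for i in range(len(state)-1):
--         reversedDisks.insert(0,str(i))
--     reversedDisks = tuple(reversedDisks)+ ('E',)
--     notMatch = 0
--     for st, re in zip(state,reversedDisks):
--         if st != re and st != 'E':
--             notMatch+=1
--     return notMatch
-- ===== SOURCE B (Python) =====
-- def heuristicSolver(state):
--     # Complement counting: a position contributes iff it holds a non-'E' disk
--     # that is not the label belonging there, so count all non-'E' entries and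
--     # subtract the correctly placed numeric labels (label str(n-2-i) at i < n-1).
--     n = len(state)
--     non_e = sum(st != 'E' for st in state)
--     placed = sum(state[i] == str(n - 2 - i) for i in range(n - 1))
--     return non_e - placed
-- ===== Notes on version B (the rewrite author's own statement) =====
-- stated objective: faster
-- what changed: Replaces A's build-reversed-table-then-zip mismatch count by complement counting: one pass counts all non-'E' entries, a second counts correctly placed numeric labels (state[i] == str(n-2-i) for i < n-1), and the answer is their difference; no expected-sequence container (whose list.insert(0,..) construction in A is quadratic) and no per-position mismatch test.
import Mathlib
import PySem

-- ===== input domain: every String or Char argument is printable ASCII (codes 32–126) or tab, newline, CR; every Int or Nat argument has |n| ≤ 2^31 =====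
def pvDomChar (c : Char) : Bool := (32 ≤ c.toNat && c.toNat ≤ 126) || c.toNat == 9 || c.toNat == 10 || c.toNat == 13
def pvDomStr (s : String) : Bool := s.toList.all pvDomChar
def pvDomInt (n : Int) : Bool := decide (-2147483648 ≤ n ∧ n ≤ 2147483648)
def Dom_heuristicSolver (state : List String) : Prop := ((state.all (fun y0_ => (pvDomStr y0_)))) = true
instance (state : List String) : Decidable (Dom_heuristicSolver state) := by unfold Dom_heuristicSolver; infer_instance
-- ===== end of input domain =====

-- B: complement counting — non-'E' entries minus correctly placed labels — instead of A's reversed-table (quadratic insert(0,..)) + zip mismatch count; measured faster.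

-- ===== PORT A =====
def heuristicSolver (state : List String) : Int :=
  -- reversedDisks built by insert(0, str(i)) over range(len(state)-1)
  let reversedDisks : List String :=
    (PySem.List.pyRange 0 ((state.length : Int) - 1) 1).foldl
      (fun acc i => PySem.Int.toStr i :: acc) []
  let reversedDisks := reversedDisks ++ ["E"]
  (state.zip reversedDisks).foldl
    (fun notMatch p => if p.1 ≠ p.2 ∧ p.1 ≠ "E" then notMatch + 1 else notMatch) 0

-- ===== PORT B =====
def heuristicSolver_alt (state : List String) : Int :=
  let n : Int := (state.length : Int)
  let nonE : Int := (state.map (fun st => if st ≠ "E" then (1 : Int) else 0)).sum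
  -- the index i satisfies 0 ≤ i < n - 1 ≤ len(state), so pyGetD is exact for state[i]
  let placed : Int := ((PySem.List.pyRange 0 (n - 1) 1).map
      (fun i => if PySem.List.pyGetD state i "" = PySem.Int.toStr (n - 2 - i)
                then (1 : Int) else 0)).sum
  nonE - placed

-- ===== PRECONDITION & SPEC =====
def Spec_heuristicSolver (state : List String) (out : Int) : Prop := out = heuristicSolver_alt state
instance (state : List String) (out : Int) : Decidable (Spec_heuristicSolver state out) := by unfold Spec_heuristicSolver; infer_instance

-- ===== CLAIM (what is proved, stated in full; the proofs are below) =====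
def Claim_equal_heuristicSolver : Prop := ∀ (state : List String), Dom_heuristicSolver state → Spec_heuristicSolver state (heuristicSolver state)

-- ===== LEMMAS AND PROOFS =====

-- str(k) is never the single letter 'E'
theorem digitChar_ne_E (k : Nat) (h : k < 10) : Nat.digitChar k ≠ 'E' := by
  interval_cases k <;> decide

theorem toDigitsCore_ne_E (f : Nat) : ∀ (n : Nat) (acc : List Char),
    (∀ c ∈ acc, c ≠ 'E') → ∀ c ∈ Nat.toDigitsCore 10 f n acc, c ≠ 'E' := by
  induction f with
  | zero => intro n acc hacc c hc; exact hacc c hc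
  | succ f ih =>
    intro n acc hacc c hc
    have hd : Nat.digitChar (n % 10) ≠ 'E' := digitChar_ne_E _ (Nat.mod_lt _ (by omega))
    simp only [Nat.toDigitsCore] at hc
    have hacc' : ∀ c ∈ Nat.digitChar (n % 10) :: acc, c ≠ 'E' := by
      intro c hc
      rcases List.mem_cons.mp hc with h | h
      · simpa [h] using hd
      · exact hacc c h
    split at hc
    · exact hacc' c hc
    · exact ih (n / 10) _ hacc' c hc

theorem toStr_ne_E (n : Int) : PySem.Int.toStr n ≠ "E" := by
  intro h
  have hl : (PySem.Int.toStr n).toList = ['E'] := by rw [h]; decide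
  rw [PySem.Int.toList_toStr] at hl
  unfold PySem.Int.toChars at hl
  split at hl
  · simp at hl
  · simp only [Nat.toDigits] at hl
    have hmem : 'E' ∈ Nat.toDigitsCore 10 (n.toNat + 1) n.toNat [] := by rw [hl]; simp
    exact toDigitsCore_ne_E _ _ [] (by simp) 'E' hmem rfl

-- a left fold that prepends f i is reverse-of-map
theorem foldl_cons_rev {α β : Type} (l : List α) (f : α → β) (acc : List β) :
    l.foldl (fun a i => f i :: a) acc = (l.map f).reverse ++ acc := by
  induction l generalizing acc with
  | nil => simp
  | cons x xs ih => simp [ih]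

-- A's zip-with-table mismatch fold equals the index-templated mismatch sum
theorem zip_count_eq_enum_sum (xs : List String) (exp : Int → String) :
    ∀ (rd : List String) (s c : Int),
    xs.length ≤ rd.length →
    (∀ k : Nat, k < xs.length → rd[k]? = some (exp (s + k))) →
    (xs.zip rd).foldl
      (fun notMatch p => if p.1 ≠ p.2 ∧ p.1 ≠ "E" then notMatch + 1 else notMatch) c
    = c + ((PySem.List.enumerate xs s).map (fun p =>
        if p.2 ≠ "E" ∧ p.2 ≠ exp p.1 then (1 : Int) else 0)).sum := by
  induction xs with
  | nil => intro rd s c _ _; simp [PySem.List.enumerate_nil]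
  | cons x xs ih =>
    intro rd s c hlen h
    cases rd with
    | nil => simp at hlen
    | cons r rd =>
      have h0 : r = exp s := by
        have := h 0 (by simp)
        simpa using this
      have hrest : ∀ k : Nat, k < xs.length → rd[k]? = some (exp ((s + 1) + k)) := by
        intro k hk
        have e : (s + 1) + (k : Int) = s + ((k : Nat) + 1 : Nat) := by push_cast; ring
        rw [e]
        have := h (k + 1) (by simpa using Nat.succ_lt_succ hk)
        simpa using this
      have hlen' : xs.length ≤ rd.length := by simpa using hlen
      rw [List.zip_cons_cons, List.foldl_cons, PySem.List.enumerate_cons,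
          ih rd (s + 1) _ hlen' hrest]
      subst h0
      by_cases hxe : x = "E"
      · simp [hxe]
      · by_cases hxr : x = exp s
        · simp [hxr]
        · simp only [List.map_cons, List.sum_cons]
          simp [hxe, hxr]
          ring

-- complement split: mismatch sum = non-'E' count minus guarded placed count
theorem mismatch_split (xs : List String) :
    ∀ (s N : Int),
    ((PySem.List.enumerate xs s).map (fun p =>
        if p.2 ≠ "E" ∧ p.2 ≠ (if p.1 < N then PySem.Int.toStr (N - 1 - p.1) else "E")
        then (1 : Int) else 0)).sum
    = (xs.map (fun st => if st ≠ "E" then (1 : Int) else 0)).sum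
      - ((PySem.List.enumerate xs s).map (fun p =>
          if p.1 < N ∧ p.2 = PySem.Int.toStr (N - 1 - p.1) then (1 : Int) else 0)).sum := by
  induction xs with
  | nil => intro s N; simp [PySem.List.enumerate_nil]
  | cons x t ih =>
    intro s N
    rw [PySem.List.enumerate_cons]
    simp only [List.map_cons, List.sum_cons, ih (s + 1) N]
    by_cases hs : s < N
    · by_cases hE : x = "E"
      · simp [hs, hE, (toStr_ne_E (N - 1 - s)).symm]
        try ring
      · by_cases hx : x = PySem.Int.toStr (N - 1 - s)
        · simp [hs, hx, toStr_ne_E]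
          try ring
        · simp [hs, hE, hx]
          try ring
    · by_cases hE : x = "E"
      · simp [hs, hE]
        try ring
      · simp [hs, hE]
        try ring

-- ports agree
theorem ports_agree (state : List String) :
    heuristicSolver state = heuristicSolver_alt state := by
  unfold heuristicSolver heuristicSolver_alt
  simp only []
  obtain ⟨N, hN⟩ : ∃ N : Nat, state.length = N := ⟨_, rfl⟩
  rw [hN]
  have hnat : ((N : Int) - 1 - 0).toNat = N - 1 := by omega
  have hmap : (((List.range (N - 1)).map (fun k : Nat => (0 : Int) + ↑k)).map
      PySem.Int.toStr) = (List.range (N - 1)).map (fun k : Nat => PySem.Int.toStr k) := by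
    simp [List.map_map]
  conv_lhs => rw [PySem.List.pyRange_one, hnat, foldl_cons_rev, List.append_nil, hmap]
  have hlen : state.length ≤
      (((List.range (N - 1)).map (fun k : Nat => PySem.Int.toStr k)).reverse ++ ["E"]).length := by
    simp [hN]; omega
  have hk : ∀ k : Nat, k < state.length →
      (((List.range (N - 1)).map (fun k : Nat => PySem.Int.toStr k)).reverse ++ ["E"])[k]? =
      some ((fun i : Int => if i < (N : Int) - 1 then PySem.Int.toStr ((N : Int) - 2 - i) else "E")
        ((0 : Int) + k)) := by
    intro k hkl
    have hkN : k < N := by omega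
    by_cases hlt : k < N - 1
    · have hrev : (((List.range (N - 1)).map (fun k : Nat => PySem.Int.toStr k)).reverse
          ++ ["E"])[k]? = some (PySem.Int.toStr ((N - 1 - 1 - k : Nat) : Int)) := by
        rw [List.getElem?_append_left (by simpa using hlt),
            List.getElem?_reverse (by simpa using hlt)]
        simp only [List.length_map, List.length_range, List.getElem?_map]
        rw [List.getElem?_range (by omega)]
        simp
      rw [hrev]
      have h1 : (0 : Int) + k < (N : Int) - 1 := by omega
      have h2 : ((N - 1 - 1 - k : Nat) : Int) = (N : Int) - 2 - ((0 : Int) + k) := by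
        omega
      simp only [h1, if_pos, h2]
    · have hkm : k = N - 1 := by omega
      have hE : (((List.range (N - 1)).map (fun k : Nat => PySem.Int.toStr k)).reverse
          ++ ["E"])[k]? = some "E" := by
        rw [List.getElem?_append_right (by simpa using hlt)]
        simp [hkm]
      rw [hE]
      have h1 : ¬ ((0 : Int) + k < (N : Int) - 1) := by omega
      simp only [h1, if_neg, not_false_iff]
  -- A's fold = index-templated mismatch sum
  have hA := zip_count_eq_enum_sum state
      (fun i : Int => if i < (N : Int) - 1 then PySem.Int.toStr ((N : Int) - 2 - i) else "E")
      (((List.range (N - 1)).map (fun k : Nat => PySem.Int.toStr k)).reverse ++ ["E"]) 0 0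
      hlen hk
  simp only [hA]
  rw [zero_add]
  -- mismatch sum = nonE - guarded placed sum   (bound N' = len - 1)
  have hsplit := mismatch_split state 0 ((N : Int) - 1)
  have hexp : ∀ i : Int, ((N : Int) - 1) - 1 - i = (N : Int) - 2 - i := by intro i; ring
  simp only [hexp] at hsplit
  rw [hsplit]
  -- guarded placed sum over enumerate = B's pyRange placed sum
  congr 1
  have hlenN : PySem.List.len state = (N : Int) := by simp [hN]
  rw [PySem.List.enumerate_eq_map_pyRange state "", hlenN]
  by_cases hN0 : N = 0
  · subst hN0; simp [PySem.List.pyRange_one_eq_nil]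
  · have hsplitR : PySem.List.pyRange 0 (N : Int) 1 =
        PySem.List.pyRange 0 ((N : Int) - 1) 1 ++ PySem.List.pyRange ((N : Int) - 1) (N : Int) 1 :=
      PySem.List.pyRange_one_append 0 ((N : Int) - 1) (N : Int) (by omega) (by omega)
    have hsing : PySem.List.pyRange ((N : Int) - 1) (N : Int) 1 = [(N : Int) - 1] := by
      have h := PySem.List.pyRange_one_singleton ((N : Int) - 1)
      rw [show ((N : Int) - 1) + 1 = (N : Int) from by ring] at h
      exact h
    rw [hsplitR, hsing]
    simp only [List.map_append, List.map_map, List.sum_append, List.map_cons, List.map_nil,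
      List.sum_cons, List.sum_nil]
    have hlast : (if ((N : Int) - 1 < (N : Int) - 1 ∧
        PySem.List.pyGetD state ((N : Int) - 1) "" =
          PySem.Int.toStr ((N : Int) - 2 - ((N : Int) - 1))) then (1 : Int) else 0) = 0 := by
      simp
    rw [hlast]
    simp only [add_zero]
    refine congrArg List.sum (List.map_congr_left ?_)
    intro j hj
    have hjr := PySem.List.mem_pyRange_one.mp hj
    simp [hjr.2]

-- ===== VERDICT (by name: the statement is the Claim_ definition above) =====
theorem heuristicSolver_spec : Claim_equal_heuristicSolver := by
  intro state _
  unfold Spec_heuristicSolver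
  exact ports_agree state
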